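-- pv_equiv track=rewrite | github.com/sashauly/python_bootcamp | 00_python_basics/src/ex02/mfinder.py | is_pattern
-- ===== SOURCE A (Python) =====
-- def is_pattern(image):
--     if len(image) != 3:
--         return False
--     for char in image:
--         if len(char) != 5:
--             return False
--     m_pattern_positions = [
--         (0, 0),
--         (0, 4),
--         (1, 0),
--         (1, 1),
--         (1, 3),
--         (1, 4),
--         (2, 0),
--         (2, 2),
--         (2, 4),
--     ]
--     for i in range(3):
--         for j in range(5):
--             if (i, j) in m_pattern_positions:
--                 if image[i][j] != "*":
--                     return False
--             else:
--                 if image[i][j] == "*":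
--                     return False
--     return True
-- ===== SOURCE B (Python) =====
-- # Each row is encoded as a 5-bit integer of its star positions (MSB = leftmost
-- # cell); the image matches iff the three row codes are exactly 17, 27, 21.
-- M_MASKS = [0b10001, 0b11011, 0b10101]
--
--
-- def row_mask(row):
--     mask = 0
--     for c in row:
--         mask = mask * 2 + (c == "*")
--     return mask
--
--
-- def is_pattern(image):
--     return (
--         len(image) == 3
--         and all(len(row) == 5 for row in image)
--         and [row_mask(row) for row in image] == M_MASKS
--     )
-- ===== Notes on version B (the rewrite author's own statement) =====
-- stated objective: alternative
-- what changed: Instead of iterating the 15 coordinates and testing membership of (i,j) in a coordinate list per cell, B folds each row into a 5-bit integer star mask (mask = mask*2 + (c=='*')) and compares the three row codes to the precomputed integers [17, 27, 21].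
import Mathlib
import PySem

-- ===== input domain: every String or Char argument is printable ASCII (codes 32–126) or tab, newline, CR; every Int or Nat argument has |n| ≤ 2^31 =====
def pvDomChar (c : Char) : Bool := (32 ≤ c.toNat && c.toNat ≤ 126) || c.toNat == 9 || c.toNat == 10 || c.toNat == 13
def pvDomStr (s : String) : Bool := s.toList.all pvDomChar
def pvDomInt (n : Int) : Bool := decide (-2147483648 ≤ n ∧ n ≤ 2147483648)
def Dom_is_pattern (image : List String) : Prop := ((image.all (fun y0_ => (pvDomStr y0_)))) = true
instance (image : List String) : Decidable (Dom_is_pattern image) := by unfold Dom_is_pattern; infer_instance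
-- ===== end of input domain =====

-- B replaces A's coordinate-list membership test per cell by encoding each row
-- as a 5-bit integer star mask and comparing the three codes to [17, 27, 21] (objective: alternative).


-- ===== PORT A =====
-- the literal m_pattern_positions list of A
def mPatternPositions : List (Int × Int) :=
  [(0,0),(0,4),(1,0),(1,1),(1,3),(1,4),(2,0),(2,2),(2,4)]

-- image[i][j] (A indexes only inside the checked 3×5 bounds, so this is always `some`)
def aCell (image : List String) (i j : Int) : Option Char :=
  (PySem.List.pyGet? image i).bind (fun row => PySem.Str.pyGet? row j)

-- the `for char in image: if len(char) != 5: return False` loop (true = fell through)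
def aRowLenLoop : List String → Bool
  | [] => true
  | r :: rs => if PySem.Str.len r ≠ 5 then false else aRowLenLoop rs

-- the inner `for j in range(5)` loop with its early returns
def aJLoop (image : List String) (i : Int) : List Int → Bool
  | [] => true
  | j :: js =>
    if mPatternPositions.contains (i, j) then
      if aCell image i j != some '*' then false else aJLoop image i js
    else
      if aCell image i j == some '*' then false else aJLoop image i js

-- the outer `for i in range(3)` loop (false from the inner loop propagates out)
def aILoop (image : List String) : List Int → Bool
  | [] => true
  | i :: is' =>
    if aJLoop image i (PySem.List.pyRange 0 5 1) then aILoop image is' else false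

def is_pattern (image : List String) : Bool :=
  if image.length ≠ 3 then false
  else if aRowLenLoop image then aILoop image (PySem.List.pyRange 0 3 1)
  else false

-- ===== PORT B =====
-- the precomputed M_MASKS of Source B
def mMasks : List Int := [17, 27, 21]

-- row_mask: fold each character into the accumulator, mask*2 + (c == '*')
-- (Python's bool counts as 0/1 in arithmetic; ported as an if-expression)
def row_mask (row : String) : Int :=
  row.toList.foldl (fun m c => m * 2 + (if c = '*' then 1 else 0)) 0

def is_pattern_alt (image : List String) : Bool :=
  image.length == 3
    && image.all (fun row => PySem.Str.len row == 5)
    && (image.map row_mask == mMasks)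

-- ===== PRECONDITION & SPEC =====
def Spec_is_pattern (image : List String) (out : Bool) : Prop := out = is_pattern_alt image
instance (image : List String) (out : Bool) : Decidable (Spec_is_pattern image out) := by unfold Spec_is_pattern; infer_instance

-- ===== CLAIM (what is proved, stated in full; the proofs are below) =====
def Claim_equal_is_pattern : Prop := ∀ (image : List String), Dom_is_pattern image → Spec_is_pattern image (is_pattern image)

-- ===== LEMMAS AND PROOFS =====

-- A's row-length loop falls through exactly when every row has length 5
theorem aRowLenLoop_eq_all (rs : List String) :
    aRowLenLoop rs = rs.all (fun row => PySem.Str.len row == 5) := by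
  induction rs with
  | nil => rfl
  | cons r rs ih =>
    by_cases h : PySem.Str.len r = 5 <;> simp_all [aRowLenLoop, beq_iff_eq]

-- one step of A's inner loop, as a conjunct: the cell's star-ness must equal the pattern bit
theorem aJLoop_cons (image : List String) (i j : Int) (js : List Int) (c : Char)
    (hc : aCell image i j = some c) :
    aJLoop image i (j :: js)
      = (((c == '*') == mPatternPositions.contains (i, j)) && aJLoop image i js) := by
  rcases hb : mPatternPositions.contains (i, j) with _ | _ <;>
    rcases hs : (c == '*') with _ | _ <;>
      simp_all [aJLoop, bne]

-- the per-row equivalence: A's inner loop at concrete row index i equals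
-- (row mask = expected code) for a row of exactly five characters
theorem row_eq (image : List String) (i : Int) (row : String)
    (hr : PySem.List.pyGet? image i = some row)
    (c0 c1 c2 c3 c4 : Char) (hrow : row.toList = [c0, c1, c2, c3, c4]) (e : Int)
    (hI : (i = 0 ∧ e = 17) ∨ (i = 1 ∧ e = 27) ∨ (i = 2 ∧ e = 21)) :
    aJLoop image i (PySem.List.pyRange 0 5 1) = (row_mask row == e) := by
  have h5 : PySem.List.pyRange 0 5 1 = [0, 1, 2, 3, 4] := by decide
  have hc : ∀ k : Int, aCell image i k = PySem.List.pyGet? [c0, c1, c2, c3, c4] k := by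
    intro k
    simp [aCell, hr, PySem.Str.pyGet?, hrow]
  rw [h5,
    aJLoop_cons image i 0 _ c0 (by rw [hc]; simp [PySem.List.pyGet?, PySem.List.pyIdx?]),
    aJLoop_cons image i 1 _ c1 (by rw [hc]; simp [PySem.List.pyGet?, PySem.List.pyIdx?]),
    aJLoop_cons image i 2 _ c2 (by rw [hc]; simp [PySem.List.pyGet?, PySem.List.pyIdx?]),
    aJLoop_cons image i 3 _ c3 (by rw [hc]; simp [PySem.List.pyGet?, PySem.List.pyIdx?]),
    aJLoop_cons image i 4 _ c4 (by rw [hc]; simp [PySem.List.pyGet?, PySem.List.pyIdx?])]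
  have hm : row_mask row
      = ((((0 * 2 + (if c0 = '*' then 1 else 0)) * 2 + (if c1 = '*' then 1 else 0)) * 2
          + (if c2 = '*' then 1 else 0)) * 2 + (if c3 = '*' then 1 else 0)) * 2
          + (if c4 = '*' then 1 else 0) := by
    simp [row_mask, hrow]
  rcases hI with ⟨rfl, rfl⟩ | ⟨rfl, rfl⟩ | ⟨rfl, rfl⟩ <;>
  · by_cases h0 : c0 = '*' <;> by_cases h1 : c1 = '*' <;> by_cases h2 : c2 = '*' <;>
      by_cases h3 : c3 = '*' <;> by_cases h4 : c4 = '*' <;>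
      simp [aJLoop, hm, h0, h1, h2, h3, h4, mPatternPositions]
-- ===== VERDICT (by name: the statement is the Claim_ definition above) =====
theorem is_pattern_spec : Claim_equal_is_pattern := by
  intro image _
  unfold Spec_is_pattern is_pattern is_pattern_alt
  by_cases hlen : image.length = 3
  · rw [aRowLenLoop_eq_all]
    rcases hall : image.all (fun row => PySem.Str.len row == 5) with _ | _
    · simp [hlen]
    · obtain ⟨r0, r1, r2, rfl⟩ : ∃ a b c, image = [a, b, c] := by
        match image, hlen with
        | [a, b, c], _ => exact ⟨a, b, c, rfl⟩
      have hlen5 : ∀ r ∈ [r0, r1, r2], r.toList.length = 5 := by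
        intro r hr
        have h := List.all_eq_true.mp hall r hr
        simp only [PySem.Str.len_eq, beq_iff_eq] at h
        exact_mod_cast h
      obtain ⟨a0,a1,a2,a3,a4,hr0⟩ : ∃ a b c d e, r0.toList = [a,b,c,d,e] := by
        match h : r0.toList, hlen5 r0 (by simp) with
        | [a,b,c,d,e], _ => exact ⟨a,b,c,d,e, rfl⟩
      obtain ⟨b0,b1,b2,b3,b4,hr1⟩ : ∃ a b c d e, r1.toList = [a,b,c,d,e] := by
        match h : r1.toList, hlen5 r1 (by simp) with
        | [a,b,c,d,e], _ => exact ⟨a,b,c,d,e, rfl⟩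
      obtain ⟨d0,d1,d2,d3,d4,hr2⟩ : ∃ a b c d e, r2.toList = [a,b,c,d,e] := by
        match h : r2.toList, hlen5 r2 (by simp) with
        | [a,b,c,d,e], _ => exact ⟨a,b,c,d,e, rfl⟩
      have h3 : PySem.List.pyRange 0 3 1 = [0, 1, 2] := by decide
      have hg0 : PySem.List.pyGet? [r0, r1, r2] 0 = some r0 := by
        simp [PySem.List.pyGet?, PySem.List.pyIdx?]
      have hg1 : PySem.List.pyGet? [r0, r1, r2] 1 = some r1 := by
        simp [PySem.List.pyGet?, PySem.List.pyIdx?]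
      have hg2 : PySem.List.pyGet? [r0, r1, r2] 2 = some r2 := by
        simp [PySem.List.pyGet?, PySem.List.pyIdx?]
      have e0 := row_eq _ 0 r0 hg0 a0 a1 a2 a3 a4 hr0 17 (Or.inl ⟨rfl, rfl⟩)
      have e1 := row_eq _ 1 r1 hg1 b0 b1 b2 b3 b4 hr1 27 (Or.inr (Or.inl ⟨rfl, rfl⟩))
      have e2 := row_eq _ 2 r2 hg2 d0 d1 d2 d3 d4 hr2 21 (Or.inr (Or.inr ⟨rfl, rfl⟩))
      rw [h3]
      simp only [aILoop, e0, e1, e2, List.map, mMasks]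
      rcases hm0 : (row_mask r0 == 17) with _ | _ <;>
        rcases hm1 : (row_mask r1 == 27) with _ | _ <;>
          rcases hm2 : (row_mask r2 == 21) with _ | _ <;>
            simp_all [beq_iff_eq]
  · simp [hlen]
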